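-- pv_equiv track=rewrite | github.com/ClarityNLP/ClarityNLP | native_setup/validate_results0.py | _validate_term_proximity_results
-- ===== SOURCE A (Python) =====
-- def _fields_exist(field_list, row_dict):
--
--     for f in field_list:
--         if f not in row_dict:
--             return False
--     return True
--
-- def _validate_term_proximity_results(results):
--
--     FIELDS = ['word1', 'word2']
--
--     EV0 = ('cancer', 'prostate')
--     EV1 = ('prostate', 'gleason')
--     EXPECTED_VALUES = set([EV0, EV1])
--
--     if 2 != len(results):
--         return False
--
--     for result in results:
--
--         if not _fields_exist(FIELDS, result):
--             return False
--
--         w1 = result['word1']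
--         w2 = result['word2']
--         t = (w1, w2)
--
--         if EV0 == t:
--             if EV0 in EXPECTED_VALUES:
--                 EXPECTED_VALUES.remove(EV0)
--             else:
--                 return False
--         elif EV1 == t:
--             if EV1 in EXPECTED_VALUES:
--                 EXPECTED_VALUES.remove(EV1)
--             else:
--                 return False
--         else:
--             return False
--
--     return True
-- ===== SOURCE B (Python) =====
-- EXPECTED = {('cancer', 'prostate'), ('prostate', 'gleason')}
--
--
-- def _validate_term_proximity_results(results):
--     if len(results) != 2:
--         return False
--     pairs = set()
--     for row in results:
--         if 'word1' not in row or 'word2' not in row: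
--             return False
--         pairs.add((row['word1'], row['word2']))
--     return pairs == EXPECTED
-- ===== Notes on version B (the rewrite author's own statement) =====
-- stated objective: simpler
-- what changed: B replaces A's incremental match-and-remove against a mutable expected set (three-way branch per row) with a single gather pass collecting each (word1, word2) pair into a set and one final set-equality test against the literal expected set.
import Mathlib
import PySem

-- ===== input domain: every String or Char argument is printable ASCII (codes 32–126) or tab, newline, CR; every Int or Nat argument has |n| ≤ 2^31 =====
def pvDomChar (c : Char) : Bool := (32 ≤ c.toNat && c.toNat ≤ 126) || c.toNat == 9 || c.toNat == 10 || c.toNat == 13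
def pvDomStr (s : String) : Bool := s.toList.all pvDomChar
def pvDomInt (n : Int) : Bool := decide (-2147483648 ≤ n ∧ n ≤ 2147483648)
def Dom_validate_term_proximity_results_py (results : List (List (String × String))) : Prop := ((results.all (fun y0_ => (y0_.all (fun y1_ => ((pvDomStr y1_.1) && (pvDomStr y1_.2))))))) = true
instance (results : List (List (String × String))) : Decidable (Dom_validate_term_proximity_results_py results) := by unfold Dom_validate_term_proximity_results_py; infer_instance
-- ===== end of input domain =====

-- B replaces A's match-and-remove loop over a mutable expected set with a gather pass plus one
-- set-equality comparison; objective: simpler.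


-- first-match lookup on the association list representing a Python dict (exact: dict access / 'in')
def pvLookup? (row : List (String × String)) (k : String) : Option String :=
  match row with
  | [] => none
  | (a, b) :: rest => if a == k then some b else pvLookup? rest k

-- ===== PORT A =====
-- _fields_exist: loop over the field list, False on first missing key
def pvFieldsExist (fields : List String) (row : List (String × String)) : Bool :=
  match fields with
  | [] => true
  | f :: rest => if (pvLookup? row f).isSome = false then false else pvFieldsExist rest row

-- the 'for result in results' loop, carrying the mutable EXPECTED_VALUES set
def pvLoopA (results : List (List (String × String))) (ev : PySem.Set (String × String)) : Bool :=
  match results with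
  | [] => true
  | r :: rest =>
    if pvFieldsExist ["word1", "word2"] r = false then false
    else
      let w1 := (pvLookup? r "word1").getD ""   -- present: guarded by _fields_exist
      let w2 := (pvLookup? r "word2").getD ""
      let t := (w1, w2)
      if ("cancer", "prostate") == t then
        if PySem.Set.contains ev ("cancer", "prostate") then
          pvLoopA rest (PySem.Set.discard ev ("cancer", "prostate"))   -- remove after membership check
        else false
      else if ("prostate", "gleason") == t then
        if PySem.Set.contains ev ("prostate", "gleason") then
          pvLoopA rest (PySem.Set.discard ev ("prostate", "gleason"))
        else false
      else false

def validate_term_proximity_results_py (results : List (List (String × String))) : Bool :=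
  if ((2 : Int) == (results.length : Int)) = false then false
  else pvLoopA results (PySem.Set.ofList [("cancer", "prostate"), ("prostate", "gleason")])

-- ===== PORT B =====
-- gather pass: collect each (word1, word2) into a set, none = early False on a missing key
def pvGatherB (results : List (List (String × String))) (acc : PySem.Set (String × String)) :
    Option (PySem.Set (String × String)) :=
  match results with
  | [] => some acc
  | r :: rest =>
    match pvLookup? r "word1", pvLookup? r "word2" with
    | some w1, some w2 => pvGatherB rest (PySem.Set.add acc (w1, w2))
    | _, _ => none

def validate_term_proximity_results_py_alt (results : List (List (String × String))) : Bool :=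
  if results.length ≠ 2 then false
  else
    match pvGatherB results PySem.Set.empty with
    | none => false
    | some pairs =>
        PySem.Set.equal pairs (PySem.Set.ofList [("cancer", "prostate"), ("prostate", "gleason")])

-- ===== PRECONDITION & SPEC =====
def Spec_validate_term_proximity_results_py (results : List (List (String × String))) (out : Bool) : Prop := out = validate_term_proximity_results_py_alt results
instance (results : List (List (String × String))) (out : Bool) : Decidable (Spec_validate_term_proximity_results_py results out) := by unfold Spec_validate_term_proximity_results_py; infer_instance

-- ===== CLAIM (what is proved, stated in full; the proofs are below) =====
def Claim_equal_validate_term_proximity_results_py : Prop := ∀ (results : List (List (String × String))), Dom_validate_term_proximity_results_py results → Spec_validate_term_proximity_results_py results (validate_term_proximity_results_py results)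

-- ===== LEMMAS AND PROOFS =====

-- ===== VERDICT (by name: the statement is the Claim_ definition above) =====
-- a set containing a pair other than the two expected ones is never equal to the expected set
theorem pv_equal_bad (p : String × String) (s : List (String × String))
    (hmem : p ∈ s) (hb1 : p ≠ ("cancer", "prostate")) (hb2 : p ≠ ("prostate", "gleason")) :
    PySem.Set.equal s (PySem.Set.ofList [("cancer", "prostate"), ("prostate", "gleason")]) = false := by
  rw [Bool.eq_false_iff]
  intro h
  rw [PySem.Set.equal_iff] at h
  have hmem2 := (h p).mp hmem
  rw [PySem.Set.mem_ofList] at hmem2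
  simp only [List.mem_cons] at hmem2
  tauto

theorem validate_term_proximity_results_py_spec : Claim_equal_validate_term_proximity_results_py := by
  intro results _
  unfold Spec_validate_term_proximity_results_py
  unfold validate_term_proximity_results_py validate_term_proximity_results_py_alt
  match results with
  | [] => decide
  | [r] => simp
  | r1 :: r2 :: r3 :: rest =>
      simp only [List.length]
      simp
      intro h
      exact absurd h (by omega)
  | [r1, r2] =>
      rcases h1 : pvLookup? r1 "word1" with _ | w1 <;>
        rcases h2 : pvLookup? r1 "word2" with _ | w2
      · simp [pvGatherB, pvLoopA, pvFieldsExist, h1]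
      · simp [pvGatherB, pvLoopA, pvFieldsExist, h1]
      · simp [pvGatherB, pvLoopA, pvFieldsExist, h1, h2]
      · rcases h3 : pvLookup? r2 "word1" with _ | w3 <;>
          rcases h4 : pvLookup? r2 "word2" with _ | w4
        · simp [pvGatherB, pvLoopA, pvFieldsExist, h1, h2, h3, h4]
        · simp [pvGatherB, pvLoopA, pvFieldsExist, h1, h2, h3, h4]
        · simp [pvGatherB, pvLoopA, pvFieldsExist, h1, h2, h3, h4]
        · by_cases e1 : (w1, w2) = (("cancer" : String), ("prostate" : String))
          · injection e1 with ea eb; subst ea; subst eb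
            by_cases e3 : (w3, w4) = (("cancer" : String), ("prostate" : String))
            · injection e3 with ec ed; subst ec; subst ed
              simp [pvGatherB, pvLoopA, pvFieldsExist, h1, h2, h3, h4]
              decide
            · by_cases e4 : (w3, w4) = (("prostate" : String), ("gleason" : String))
              · injection e4 with ec ed; subst ec; subst ed
                simp [pvGatherB, pvLoopA, pvFieldsExist, h1, h2, h3, h4]
                try decide
                try tauto
              · have hB := pv_equal_bad (w3, w4)
                  (PySem.Set.add [(("cancer" : String), ("prostate" : String))] (w3, w4))
                  (by rw [PySem.Set.mem_add]; right; rfl) e3 e4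
                simp [pvGatherB, pvLoopA, pvFieldsExist, h1, h2, h3, h4,
                  Ne.symm e3, Ne.symm e4, hB]
          · by_cases e2 : (w1, w2) = (("prostate" : String), ("gleason" : String))
            · injection e2 with ea eb; subst ea; subst eb
              by_cases e3 : (w3, w4) = (("cancer" : String), ("prostate" : String))
              · injection e3 with ec ed; subst ec; subst ed
                simp [pvGatherB, pvLoopA, pvFieldsExist, h1, h2, h3, h4]
                try decide
                try tauto
              · by_cases e4 : (w3, w4) = (("prostate" : String), ("gleason" : String))
                · injection e4 with ec ed; subst ec; subst ed
                  simp [pvGatherB, pvLoopA, pvFieldsExist, h1, h2, h3, h4]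
                  try decide
                  try tauto
                · have hB := pv_equal_bad (w3, w4)
                    (PySem.Set.add [(("prostate" : String), ("gleason" : String))] (w3, w4))
                    (by rw [PySem.Set.mem_add]; right; rfl) e3 e4
                  simp [pvGatherB, pvLoopA, pvFieldsExist, h1, h2, h3, h4,
                    Ne.symm e3, Ne.symm e4, hB]
            · have hB := pv_equal_bad (w1, w2)
                (PySem.Set.add [(w1, w2)] (w3, w4))
                (by rw [PySem.Set.mem_add]; left; exact List.mem_singleton.mpr rfl)
                e1 e2
              simp [pvGatherB, pvLoopA, pvFieldsExist, h1, h2, h3, h4,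
                Ne.symm e1, Ne.symm e2, hB]
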